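-- pv_equiv track=rewrite | github.com/lutteropp/NetRAX | experiments/src/dendroscope_wrapper.py | convert_newick_to_dendroscope
-- ===== SOURCE A (Python) =====
-- def convert_newick_to_dendroscope(newick):
--     new_newick = ""
--     seenColon = False
--     skip = False
--     for c in newick:
--         if c == ':':
--             skip = seenColon
--             seenColon = True
--         elif c in [',', '(', ')', ';']:
--             skip = False
--             seenColon = False
--         if not skip and c != '\n':
--             new_newick += c
--     return new_newick
-- ===== SOURCE B (Python) =====
-- def _trim_segment(seg):
--     # keep everything up to (but excluding) the second ':' of the segment
--     head, sep, tail = seg.partition(':')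
--     return head + sep + tail.partition(':')[0]
--
--
-- def convert_newick_to_dendroscope(newick):
--     s = ''.join(c for c in newick if c != '\n')
--     parts = []
--     seg = ''
--     for c in s:
--         if c in ',();':
--             parts.append(_trim_segment(seg))
--             parts.append(c)
--             seg = ''
--         else:
--             seg += c
--     parts.append(_trim_segment(seg))
--     return ''.join(parts)
-- ===== Notes on version B (the rewrite author's own statement) =====
-- stated objective: idiomatic
-- what changed: Replaces A's per-character seenColon/skip boolean state machine with newline removal followed by splitting into delimiter-bounded segments, each trimmed after its second colon via str.partition.
import Mathlib
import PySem

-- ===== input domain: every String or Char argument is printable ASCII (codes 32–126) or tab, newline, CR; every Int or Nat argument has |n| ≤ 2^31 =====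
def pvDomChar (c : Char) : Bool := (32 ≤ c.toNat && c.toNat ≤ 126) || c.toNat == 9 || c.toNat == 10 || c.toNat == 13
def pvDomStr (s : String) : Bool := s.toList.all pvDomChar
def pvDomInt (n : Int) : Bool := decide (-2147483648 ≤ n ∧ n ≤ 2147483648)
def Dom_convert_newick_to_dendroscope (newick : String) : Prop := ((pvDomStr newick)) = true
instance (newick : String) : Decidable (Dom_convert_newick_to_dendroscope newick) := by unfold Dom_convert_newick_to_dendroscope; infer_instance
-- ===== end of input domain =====

-- B drops newlines first, then splits the string into delimiter-bounded segments and trims each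
-- after its second colon with str.partition, instead of A's per-character seenColon/skip state
-- machine (objective: simpler/more idiomatic; same cost).

-- ===== PORT A =====
-- per-character state machine: state = (accumulated output, seenColon, skip)
def stepA (st : List Char × Bool × Bool) (c : Char) : List Char × Bool × Bool :=
  let seenColon := if c = ':' then true
    else if c = ',' ∨ c = '(' ∨ c = ')' ∨ c = ';' then false else st.2.1
  let skip := if c = ':' then st.2.1
    else if c = ',' ∨ c = '(' ∨ c = ')' ∨ c = ';' then false else st.2.2
  (if skip = false ∧ ¬ (c = '\n') then st.1 ++ [c] else st.1, seenColon, skip)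

def convert_newick_to_dendroscope (newick : String) : String :=
  String.mk (newick.toList.foldl stepA ([], false, false)).1

-- ===== PORT B =====
-- hand port of Python's str.partition(sep) for the one-character sep ':' (exact: splits at the
-- first ':' if any; the Bool is whether the separator was found, i.e. sep = ':' vs sep = '')
def partColon : List Char → List Char × Bool × List Char
  | [] => ([], false, [])
  | c :: cs =>
      if c = ':' then ([], true, cs)
      else
        let r := partColon cs
        (c :: r.1, r.2.1, r.2.2)

-- port of _trim_segment: head + sep + tail.partition(':')[0]
def trimSegment (seg : List Char) : List Char :=
  let r := partColon seg
  r.1 ++ (if r.2.1 then [':'] else []) ++ (partColon r.2.2).1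

-- the loop body: flush the segment (trimmed) and the delimiter, or extend the segment
def stepB (st : List (List Char) × List Char) (c : Char) : List (List Char) × List Char :=
  if c = ',' ∨ c = '(' ∨ c = ')' ∨ c = ';' then
    (st.1 ++ [trimSegment st.2, [c]], [])
  else (st.1, st.2 ++ [c])

def convert_newick_to_dendroscope_alt (newick : String) : String :=
  let s := newick.toList.filter (fun c => ¬ (c = '\n'))   -- ''.join(c for c in newick if c != '\n')
  let r := s.foldl stepB ([], [])
  String.mk ((r.1 ++ [trimSegment r.2]).flatten)          -- ''.join(parts) after the final flush

-- ===== PRECONDITION & SPEC =====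
def Spec_convert_newick_to_dendroscope (newick : String) (out : String) : Prop := out = convert_newick_to_dendroscope_alt newick
instance (newick : String) (out : String) : Decidable (Spec_convert_newick_to_dendroscope newick out) := by unfold Spec_convert_newick_to_dendroscope; infer_instance

-- ===== CLAIM (what is proved, stated in full; the proofs are below) =====
def Claim_equal_convert_newick_to_dendroscope : Prop := ∀ (newick : String), Dom_convert_newick_to_dendroscope newick → Spec_convert_newick_to_dendroscope newick (convert_newick_to_dendroscope newick)

-- ===== LEMMAS AND PROOFS =====

theorem partColon_not_mem {seg : List Char} (h : ':' ∉ seg) :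
    partColon seg = (seg, false, []) := by
  induction seg with
  | nil => rfl
  | cons c cs ih =>
    simp only [List.mem_cons, not_or] at h
    simp [partColon, Ne.symm h.1, ih h.2]

theorem partColon_append_not_mem {seg : List Char} (h : ':' ∉ seg) (xs : List Char) :
    partColon (seg ++ xs) = (seg ++ (partColon xs).1, (partColon xs).2.1, (partColon xs).2.2) := by
  induction seg with
  | nil => simp
  | cons c cs ih =>
    simp only [List.mem_cons, not_or] at h
    simp [partColon, Ne.symm h.1, ih h.2]

theorem partColon_append_mem {seg : List Char} (h : ':' ∈ seg) (xs : List Char) :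
    partColon (seg ++ xs) = ((partColon seg).1, true, (partColon seg).2.2 ++ xs) := by
  induction seg with
  | nil => simp at h
  | cons c cs ih =>
    by_cases hc : c = ':'
    · simp [partColon, hc]
    · have : ':' ∈ cs := by
        rcases List.mem_cons.1 h with h' | h'
        · exact absurd h'.symm hc
        · exact h'
      simp [partColon, hc, ih this]

theorem partColon_sep_of_mem {seg : List Char} (h : ':' ∈ seg) :
    (partColon seg).2.1 = true := by
  induction seg with
  | nil => simp at h
  | cons c cs ih =>
    by_cases hc : c = ':'
    · simp [partColon, hc]
    · have h' : ':' ∈ cs := by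
        rcases List.mem_cons.1 h with h' | h'
        · exact absurd h'.symm hc
        · exact h'
      simp [partColon, hc, ih h']

-- main invariant: running A's state machine from a state that matches B's buffered state
-- (acc = flushed parts + trimmed current segment; seenColon/skip = "segment has a 1st/2nd colon")
-- yields B's flushed-and-joined result.
theorem mainInv (cs : List Char) (hnl : '\n' ∉ cs) (parts : List (List Char)) (seg : List Char) :
    (cs.foldl stepA (parts.flatten ++ trimSegment seg,
        (partColon seg).2.1, (partColon (partColon seg).2.2).2.1)).1
    = ((cs.foldl stepB (parts, seg)).1
        ++ [trimSegment (cs.foldl stepB (parts, seg)).2]).flatten := by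
  induction cs generalizing parts seg with
  | nil => simp
  | cons c cs ih =>
    simp only [List.mem_cons, not_or] at hnl
    obtain ⟨hnl1, hnl2⟩ := hnl
    have hcnl : ¬ c = '\n' := fun h => hnl1 h.symm
    rw [List.foldl_cons, List.foldl_cons]
    by_cases hdel : c = ',' ∨ c = '(' ∨ c = ')' ∨ c = ';'
    · have hcol : ¬ c = ':' := by rcases hdel with h | h | h | h <;> subst h <;> decide
      have hA : stepA (parts.flatten ++ trimSegment seg,
          (partColon seg).2.1, (partColon (partColon seg).2.2).2.1) c
          = (parts.flatten ++ trimSegment seg ++ [c], false, false) := by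
        simp [stepA, hcol, hdel, hcnl]
      have hB : stepB (parts, seg) c = (parts ++ [trimSegment seg, [c]], []) := by
        simp [stepB, hdel]
      rw [hA, hB]
      have h0 := ih hnl2 (parts ++ [trimSegment seg, [c]]) []
      simpa [trimSegment, partColon] using h0
    · by_cases hcol : c = ':'
      · subst hcol
        by_cases h1 : ':' ∈ seg
        · have s1 := partColon_sep_of_mem h1
          have e1 := partColon_append_mem h1 [':']
          have s2 : (partColon ((partColon seg).2.2 ++ [':'])).2.1 = true :=
            partColon_sep_of_mem (by simp)
          have etrim : trimSegment (seg ++ [':']) = trimSegment seg := by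
            by_cases h2 : ':' ∈ (partColon seg).2.2
            · simp [trimSegment, e1, s1, (partColon_append_mem h2 [':'] : _)]
            · simp [trimSegment, e1, s1, partColon_append_not_mem h2 [':'],
                partColon_not_mem h2, partColon]
          have hA : stepA (parts.flatten ++ trimSegment seg,
              (partColon seg).2.1, (partColon (partColon seg).2.2).2.1) ':'
              = (parts.flatten ++ trimSegment seg, true, true) := by
            simp [stepA, s1]
          have hB : stepB (parts, seg) ':' = (parts, seg ++ [':']) := by
            simp [stepB]
          rw [hA, hB]
          have h0 := ih hnl2 parts (seg ++ [':'])
          rw [etrim, e1] at h0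
          simpa [s2] using h0
        · have e0 := partColon_not_mem h1
          have e1 : partColon (seg ++ [':']) = (seg, true, []) := by
            simpa [partColon] using partColon_append_not_mem h1 [':']
          have etrim0 : trimSegment seg = seg := by simp [trimSegment, e0, partColon]
          have etrim : trimSegment (seg ++ [':']) = seg ++ [':'] := by
            simp [trimSegment, e1, partColon]
          have hA : stepA (parts.flatten ++ trimSegment seg,
              (partColon seg).2.1, (partColon (partColon seg).2.2).2.1) ':'
              = (parts.flatten ++ seg ++ [':'], true, false) := by
            simp [stepA, e0, etrim0]
          have hB : stepB (parts, seg) ':' = (parts, seg ++ [':']) := by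
            simp [stepB]
          rw [hA, hB]
          have h0 := ih hnl2 parts (seg ++ [':'])
          rw [etrim, e1] at h0
          simpa [partColon, List.append_assoc] using h0
      · -- ordinary character: not a delimiter, not ':', not '\n'
        have hB : stepB (parts, seg) c = (parts, seg ++ [c]) := by
          simp [stepB, hdel]
        have epc : partColon [c] = ([c], false, []) := by simp [partColon, hcol]
        by_cases h1 : ':' ∈ seg
        · have s1 := partColon_sep_of_mem h1
          have e1 := partColon_append_mem h1 [c]
          by_cases h2 : ':' ∈ (partColon seg).2.2
          · have s2 := partColon_sep_of_mem h2
            have e2 := partColon_append_mem h2 [c]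
            have s2' : (partColon ((partColon seg).2.2 ++ [c])).2.1 = true := by
              rw [e2]
            have etrim : trimSegment (seg ++ [c]) = trimSegment seg := by
              simp [trimSegment, e1, s1, e2]
            have hA : stepA (parts.flatten ++ trimSegment seg,
                (partColon seg).2.1, (partColon (partColon seg).2.2).2.1) c
                = (parts.flatten ++ trimSegment seg, (partColon seg).2.1, true) := by
              simp [stepA, hcol, hdel, s2]
            rw [hA, hB]
            have h0 := ih hnl2 parts (seg ++ [c])
            rw [etrim, e1] at h0
            simpa [s1, s2'] using h0
          · have f2 := partColon_not_mem h2
            have e2 : partColon ((partColon seg).2.2 ++ [c]) = ((partColon seg).2.2 ++ [c], false, []) := by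
              simpa [epc] using partColon_append_not_mem h2 [c]
            have etrim : trimSegment (seg ++ [c]) = trimSegment seg ++ [c] := by
              simp [trimSegment, e1, s1, e2, f2]
            have hA : stepA (parts.flatten ++ trimSegment seg,
                (partColon seg).2.1, (partColon (partColon seg).2.2).2.1) c
                = (parts.flatten ++ trimSegment seg ++ [c], (partColon seg).2.1, false) := by
              simp [stepA, hcol, hdel, f2, hcnl]
            rw [hA, hB]
            have h0 := ih hnl2 parts (seg ++ [c])
            rw [etrim, e1] at h0
            simpa [s1, e2, List.append_assoc] using h0
        · have e0 := partColon_not_mem h1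
          have e1 : partColon (seg ++ [c]) = (seg ++ [c], false, []) := by
            simpa [epc] using partColon_append_not_mem h1 [c]
          have etrim0 : trimSegment seg = seg := by simp [trimSegment, e0, partColon]
          have etrim : trimSegment (seg ++ [c]) = seg ++ [c] := by
            simp [trimSegment, e1, partColon]
          have hA : stepA (parts.flatten ++ trimSegment seg,
              (partColon seg).2.1, (partColon (partColon seg).2.2).2.1) c
              = (parts.flatten ++ seg ++ [c], false, false) := by
            simp [stepA, hcol, hdel, e0, etrim0, partColon, hcnl]
          rw [hA, hB]
          have h0 := ih hnl2 parts (seg ++ [c])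
          rw [etrim, e1] at h0
          simpa [partColon, List.append_assoc] using h0

theorem foldA_filter (cs : List Char) (st : List Char × Bool × Bool) :
    cs.foldl stepA st = (cs.filter (fun c => ¬ (c = '\n'))).foldl stepA st := by
  induction cs generalizing st with
  | nil => rfl
  | cons c cs ih =>
    by_cases hc : c = '\n'
    · subst hc
      have : stepA st '\n' = st := by simp [stepA]
      simp [List.foldl_cons, this, ih]
    · simp [List.foldl_cons, hc, ih]

-- ===== VERDICT (by name: the statement is the Claim_ definition above) =====
theorem convert_newick_to_dendroscope_spec : Claim_equal_convert_newick_to_dendroscope := by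
  intro newick _
  have h := mainInv (newick.toList.filter (fun c => ¬ (c = '\n'))) (by simp) [] []
  simp only [trimSegment, partColon, List.flatten_nil, List.append_nil,
    if_false, Bool.false_eq_true] at h
  show convert_newick_to_dendroscope newick = convert_newick_to_dendroscope_alt newick
  unfold convert_newick_to_dendroscope convert_newick_to_dendroscope_alt
  rw [foldA_filter]
  exact congrArg String.mk h
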